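-- pv_equiv track=rewrite | github.com/impact27/WF_NTP | WF_NTP/WF_NTP_script.py | form_bend_array
-- ===== SOURCE A (Python) =====
-- def form_bend_array(bend_times, t_p):
--     bend_i = 0
--     bl = []
--     if len(bend_times):
--         for i, t in enumerate(t_p):
--             if t > bend_times[bend_i]:
--                 if bend_i < len(bend_times) - 1:
--                     bend_i += 1
--             bl.append(bend_i)
--     return bl
-- ===== SOURCE B (Python) =====
-- def form_bend_array(bend_times, t_p):
--     if not bend_times:
--         return []
--     out = []
--     level = 0
--     last = len(bend_times) - 1
--     i = 0
--     n = len(t_p)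
--     while level < last:
--         j = next((k for k in range(i, n) if t_p[k] > bend_times[level]), None)
--         if j is None:
--             out.extend([level] * (n - i))
--             return out
--         out.extend([level] * (j - i))
--         out.append(level + 1)
--         i = j + 1
--         level += 1
--     out.extend([last] * (n - i))
--     return out
-- ===== Notes on version B (the rewrite author's own statement) =====
-- stated objective: alternative
-- what changed: Instead of A's single pass over t_p mutating a bend_i pointer per element, B iterates over bend LEVELS: for each level it searches forward from its cursor for the first time exceeding the current bend time and emits the output in replicated blocks ([level]*(j-i) ++ [level+1]), then fills the remainder with the last level.
import Mathlib
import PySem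

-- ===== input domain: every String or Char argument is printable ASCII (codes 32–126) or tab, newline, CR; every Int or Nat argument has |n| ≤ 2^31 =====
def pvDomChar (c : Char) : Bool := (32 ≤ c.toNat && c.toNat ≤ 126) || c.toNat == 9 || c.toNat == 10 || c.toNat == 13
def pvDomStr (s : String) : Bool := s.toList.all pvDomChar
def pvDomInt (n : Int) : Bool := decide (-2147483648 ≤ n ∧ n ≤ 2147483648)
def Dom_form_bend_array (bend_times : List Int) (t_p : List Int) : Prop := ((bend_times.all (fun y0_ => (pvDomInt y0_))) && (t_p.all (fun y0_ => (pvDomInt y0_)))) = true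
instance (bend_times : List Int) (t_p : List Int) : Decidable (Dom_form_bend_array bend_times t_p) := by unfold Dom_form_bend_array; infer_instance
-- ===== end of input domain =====

-- B replaces A's per-element pointer scan by a level-by-level segment construction
-- (search for the first exceeding time, emit replicated blocks); alternative decomposition, same cost.

-- ===== PORT A =====
-- A's loop body: advance bend_i (if t exceeds current bend time and it is not the last index), then append it
def pvStepA (bend_times : List Int) (s : Int × List Int) (t : Int) : Int × List Int :=
  let bend_i := if t > (PySem.List.pyGet? bend_times s.1).getD 0 then
                  (if s.1 < (bend_times.length : Int) - 1 then s.1 + 1 else s.1)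
                else s.1
  (bend_i, s.2 ++ [bend_i])

def form_bend_array (bend_times : List Int) (t_p : List Int) : List Int :=
  if bend_times.length ≠ 0 then
    (t_p.foldl (pvStepA bend_times) (0, [])).2
  else []

-- ===== PORT B =====
-- B's while loop over levels: 'rest' is the untraversed suffix t_p[i:] (B's index i); find the first
-- element of it exceeding bend_times[level], emit [level]*(j-i) ++ [level+1], continue at level+1;
-- the final level fills the remainder.
def pvGoB (bend_times : List Int) (last : Nat) (level : Nat) (rest : List Int) : List Int :=
  if level < last then
    match rest.findIdx? (fun t => bend_times.getD level 0 < t) with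
    | none => List.replicate rest.length (level : Int)
    | some j => List.replicate j (level : Int) ++ [(level : Int) + 1] ++ pvGoB bend_times last (level + 1) (rest.drop (j + 1))
  else List.replicate rest.length (level : Int)
termination_by last - level

def form_bend_array_alt (bend_times : List Int) (t_p : List Int) : List Int :=
  if bend_times = [] then []
  else pvGoB bend_times (bend_times.length - 1) 0 t_p

-- ===== PRECONDITION & SPEC =====
def Spec_form_bend_array (bend_times : List Int) (t_p : List Int) (out : List Int) : Prop := out = form_bend_array_alt bend_times t_p
instance (bend_times : List Int) (t_p : List Int) (out : List Int) : Decidable (Spec_form_bend_array bend_times t_p out) := by unfold Spec_form_bend_array; infer_instance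

-- ===== CLAIM (what is proved, stated in full; the proofs are below) =====
def Claim_equal_form_bend_array : Prop := ∀ (bend_times : List Int) (t_p : List Int), Dom_form_bend_array bend_times t_p → Spec_form_bend_array bend_times t_p (form_bend_array bend_times t_p)

-- ===== LEMMAS AND PROOFS =====

-- the sequence of states A produces starting from b over ts
def pvRun (bend_times : List Int) (b : Int) : List Int → List Int
  | [] => []
  | t :: ts =>
      let nb := (pvStepA bend_times (b, []) t).1
      nb :: pvRun bend_times nb ts

theorem pvFoldA (bend_times : List Int) (ts : List Int) :
    ∀ (b : Int) (l : List Int),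
      (ts.foldl (pvStepA bend_times) (b, l)).2 = l ++ pvRun bend_times b ts := by
  induction ts with
  | nil => intro b l; simp [pvRun]
  | cons t ts ih =>
      intro b l
      simp only [List.foldl_cons, pvRun]
      have : pvStepA bend_times (b, l) t
          = ((pvStepA bend_times (b, []) t).1, l ++ [(pvStepA bend_times (b, []) t).1]) := by
        simp [pvStepA]
      rw [this, ih]
      simp

-- pvGoB absorbs a non-exceeding head element as one more copy of the current level
theorem pvGoB_cons_stay (bend_times : List Int) (last level : Nat) (t : Int) (ts : List Int)
    (h : ¬ bend_times.getD level 0 < t) :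
    pvGoB bend_times last level (t :: ts) = (level : Int) :: pvGoB bend_times last level ts := by
  by_cases hl : level < last
  · rw [pvGoB, pvGoB]
    simp only [hl, if_true]
    rw [List.findIdx?_cons]
    simp only [h, decide_false, Bool.false_eq_true, if_false]
    cases hfi : ts.findIdx? (fun t => decide (bend_times.getD level 0 < t)) with
    | none => simp [List.replicate_succ]
    | some j => simp [List.replicate_succ]
  · rw [pvGoB, pvGoB]
    simp [hl, List.replicate_succ]

-- the main invariant: A's run from level equals B's segment construction from level
theorem pvRun_eq_goB (bend_times : List Int) (hne : bend_times ≠ []) (ts : List Int) :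
    ∀ level : Nat, level ≤ bend_times.length - 1 →
      pvRun bend_times (level : Int) ts = pvGoB bend_times (bend_times.length - 1) level ts := by
  induction ts with
  | nil =>
      intro level _
      rw [pvRun, pvGoB]
      by_cases hl : level < bend_times.length - 1 <;> simp [hl]
  | cons t ts ih =>
      intro level hle
      have hlen : 0 < bend_times.length := List.length_pos_iff.mpr hne
      have hidx : (PySem.List.pyGet? bend_times (level : Int)).getD 0 = bend_times[level]?.getD 0 := by
        have hlt : level < bend_times.length := by omega
        simp [PySem.List.pyGet?, PySem.List.pyIdx?, hlt]
      by_cases hl : level < bend_times.length - 1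
      · by_cases ht : bend_times[level]?.getD 0 < t
        · -- advance: head exceeds, not last level
          have hnb : (pvStepA bend_times ((level : Int), []) t).1 = ((level + 1 : Nat) : Int) := by
            simp only [pvStepA, hidx]
            have : (level : Int) < (bend_times.length : Int) - 1 := by omega
            simp [ht, this]
          rw [pvRun]
          simp only [hnb]
          rw [ih (level + 1) (by omega)]
          conv_rhs => rw [pvGoB]
          rw [if_pos hl, List.findIdx?_cons]
          simp [List.getD_eq_getElem?_getD, ht]
        · -- stay: head does not exceed
          have hnb : (pvStepA bend_times ((level : Int), []) t).1 = (level : Int) := by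
            simp [pvStepA, hidx, ht]
          rw [pvRun]
          simp only [hnb]
          rw [ih level hle, pvGoB_cons_stay bend_times _ level t ts (by simpa [List.getD_eq_getElem?_getD] using ht)]
      · -- last level: never advances
        have hlast : level = bend_times.length - 1 := by omega
        have hnb : (pvStepA bend_times ((level : Int), []) t).1 = (level : Int) := by
          have : ¬ (level : Int) < (bend_times.length : Int) - 1 := by omega
          simp only [pvStepA, hidx]
          split_ifs <;> simp_all
        rw [pvRun]
        simp only [hnb]
        rw [ih level hle, pvGoB, pvGoB]
        simp [hl, List.replicate_succ]

-- ===== VERDICT (by name: the statement is the Claim_ definition above) =====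
theorem form_bend_array_spec : Claim_equal_form_bend_array := by
  intro bend_times t_p _
  unfold Spec_form_bend_array form_bend_array form_bend_array_alt
  by_cases h : bend_times = []
  · simp [h]
  · have hlen : bend_times.length ≠ 0 := by simpa using h
    simp only [hlen, h, if_neg, if_true, ne_eq, not_false_eq_true]
    rw [pvFoldA]
    have := pvRun_eq_goB bend_times h t_p 0 (by omega)
    simpa using this
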